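-- pv_equiv track=rewrite | github.com/leixiaolin/smartMusic_v2 | find_mismatch.py | get_mismatch_line
-- ===== SOURCE A (Python) =====
-- def get_mismatch_line(standard_y,recognize_y):
--     # standard_y标准线的帧列表 recognize_y识别线的帧列表
--     ls = len(standard_y)
--     lr = len(recognize_y)
--
--     # 若标准线和识别线数量相同
--     if ls == lr:
--         return [],[]
--     # 若漏唱，即标准线大于识别线数量
--     elif ls > lr:
--         return [ls-lr],[]
--     # 多唱的情况
--     elif ls!=0:
--         min = 10000
--         min_i = 0
--         min_j = 0
--         for i in standard_y:
--             for j in recognize_y: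
--                 if abs(i-j) < min:
--                     min = abs(i-j)
--                     min_i = i
--                     min_j = j
--         standard_y.remove(min_i)
--         recognize_y.remove(min_j)
--         get_mismatch_line(standard_y,recognize_y)
--     return standard_y,recognize_y
-- ===== SOURCE B (Python) =====
-- # Alternative algorithm: pack each (distance, i, j) pair into one integer, sort the
-- # codes once, and greedily scan them.  Same return values as the original; note the
-- # original mutates its list arguments in place while this version leaves them
-- # untouched (equivalence is about the return value).
-- def get_mismatch_line(standard_y, recognize_y):
--     ls = len(standard_y)
--     lr = len(recognize_y)
--     if ls == lr:
--         return [], []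
--     if ls > lr:
--         return [ls - lr], []
--     if ls == 0:
--         return standard_y, recognize_y
--     # Pack every pair (distance, flat pair index) into one integer so a single
--     # flat int sort orders pairs by (distance, i, j); then one greedy scan.
--     block = ls * lr
--     codes = []
--     for ia, a in enumerate(standard_y):
--         for jb, b in enumerate(recognize_y):
--             codes.append(abs(a - b) * block + (ia * lr + jb))
--     codes.sort()
--     used_i = set()
--     used_j = set()
--     for c in codes:
--         k = c % block
--         ia = k // lr
--         jb = k % lr
--         if ia not in used_i and jb not in used_j:
--             used_i.add(ia)
--             used_j.add(jb)
--     return [], [b for jb, b in enumerate(recognize_y) if jb not in used_j]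
-- ===== Notes on version B (the rewrite author's own statement) =====
-- stated objective: alternative
-- what changed: Instead of recursively rescanning all remaining pairs for the closest one and removing matched values in place, B packs every (distance, i, j) pair into a single integer, sorts the codes once, and does one greedy scan with used-index sets; the leftovers are read off by one filter.
import Mathlib
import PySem

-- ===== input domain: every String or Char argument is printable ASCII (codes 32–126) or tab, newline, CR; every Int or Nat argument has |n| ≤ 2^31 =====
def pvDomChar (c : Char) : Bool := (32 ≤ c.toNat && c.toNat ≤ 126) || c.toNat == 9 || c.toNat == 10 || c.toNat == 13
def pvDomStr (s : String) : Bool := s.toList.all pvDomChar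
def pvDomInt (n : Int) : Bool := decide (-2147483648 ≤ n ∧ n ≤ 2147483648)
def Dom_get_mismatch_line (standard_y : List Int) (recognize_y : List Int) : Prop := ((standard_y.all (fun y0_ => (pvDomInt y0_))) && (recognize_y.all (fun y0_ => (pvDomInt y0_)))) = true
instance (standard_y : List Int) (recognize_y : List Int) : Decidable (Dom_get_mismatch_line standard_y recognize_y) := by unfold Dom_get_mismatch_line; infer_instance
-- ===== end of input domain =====

-- B replaces A's recursive closest-pair rescanning with one flat integer sort of all
-- packed (distance, i, j) pair codes followed by a single greedy scan (objective: alternative).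
-- Note: the Python A mutates its list arguments in place; B does not — the equivalence
-- proved here is about the return value only.

-- ===== PORT A =====
-- inner double loop of A: running (min, min_i, min_j) with sentinel start (10000, 0, 0)
def pvAMin (standard_y : List Int) (recognize_y : List Int) : Int × Int × Int :=
  standard_y.foldl (fun acc i => recognize_y.foldl (fun acc2 j =>
      if |i - j| < acc2.1 then (|i - j|, i, j) else acc2) acc) (10000, 0, 0)

theorem pv_remove?_length {xs : List Int} {v : Int} {ys : List Int}
    (h : PySem.List.remove? xs v = some ys) : ys.length < xs.length := by
  have hv : v ∈ xs := by
    by_contra hv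
    rw [(PySem.List.remove?_eq_none_iff xs v).mpr hv] at h
    simp at h
  rw [PySem.List.remove?_eq_some_erase xs v hv] at h
  cases h
  have := List.length_erase_of_mem hv
  have hpos : 0 < xs.length := List.length_pos_of_mem hv
  omega

def get_mismatch_line (standard_y : List Int) (recognize_y : List Int) : List Int × List Int :=
  if standard_y.length = recognize_y.length then ([], [])
  else if standard_y.length > recognize_y.length then
    ([(standard_y.length : Int) - (recognize_y.length : Int)], [])
  else if standard_y.length ≠ 0 then
    let t := pvAMin standard_y recognize_y
    -- Python: standard_y.remove(min_i); recognize_y.remove(min_j); then the recursive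
    -- call mutates the lists further and the final `return standard_y,recognize_y`
    -- returns exactly the lists the recursion left behind — i.e. the recursion's value.
    match h1 : PySem.List.remove? standard_y t.2.1, PySem.List.remove? recognize_y t.2.2 with
    | some s', some r' => get_mismatch_line s' r'
    | _, _ => (standard_y, recognize_y)  -- Python raises ValueError here (outside Pre_)
  else (standard_y, recognize_y)
termination_by standard_y.length
decreasing_by exact pv_remove?_length h1

-- ===== PORT B =====
def get_mismatch_line_alt (standard_y : List Int) (recognize_y : List Int) : List Int × List Int :=
  let ls := standard_y.length
  let lr := recognize_y.length
  if ls = lr then ([], [])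
  else if ls > lr then ([(ls : Int) - (lr : Int)], [])
  else if ls = 0 then (standard_y, recognize_y)
  else
    let block : Int := (ls : Int) * (lr : Int)
    let codes := (PySem.List.enumerate standard_y).foldl (fun acc p =>
      (PySem.List.enumerate recognize_y).foldl (fun acc2 q =>
        acc2 ++ [|p.2 - q.2| * block + (p.1 * (lr : Int) + q.1)]) acc) []
    let sortedCodes := PySem.List.sorted codes (fun x => x) false
    let st := sortedCodes.foldl (fun (st : PySem.Set Int × PySem.Set Int) c =>
      let k := PySem.Int.mod c block
      let ia := PySem.Int.floordiv k (lr : Int)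
      let jb := PySem.Int.mod k (lr : Int)
      if !(PySem.Set.contains st.1 ia) && !(PySem.Set.contains st.2 jb)
      then (PySem.Set.add st.1 ia, PySem.Set.add st.2 jb) else st)
      (PySem.Set.empty, PySem.Set.empty)
    ([], ((PySem.List.enumerate recognize_y).filter
        (fun q => !(PySem.Set.contains st.2 q.1))).map (fun q => q.2))

-- ===== PRECONDITION & SPEC =====
-- Helpers Pre_ needs: the greedy closest-pair matching on index masks, phrased
-- independently of both ports (A works on values with in-place `remove`, B on one
-- flat sorted code list; this helper recurses on index sets).

-- distance of the grid pair (i, j) of s × r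
def pvD (s r : List Int) (i j : Nat) : Nat := (s.getD i 0 - r.getD j 0).natAbs

-- packed comparison key: distance-major, then flat pair index (A's iteration order)
def pvCodeN (s r : List Int) (i j : Nat) : Nat :=
  pvD s r i j * (s.length * r.length) + (i * r.length + j)

-- indices < len whose Int cast is not in the used-set U
def pvFree (len : Nat) (U : List Int) : List Nat :=
  (List.range len).filter (fun i => !(PySem.Set.contains U (i : Int)))

-- all free grid pairs, in row-major (lexicographic) order
def pvPL (s r : List Int) (U V : List Int) : List (Nat × Nat) :=
  (pvFree s.length U).flatMap (fun i => (pvFree r.length V).map (fun j => (i, j)))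

-- running argmin (by packed key) over a pair list
def pvArgmin (s r : List Int) (L : List (Nat × Nat)) (p0 : Nat × Nat) : Nat × Nat :=
  L.foldl (fun acc y => if pvCodeN s r y.1 y.2 < pvCodeN s r acc.1 acc.2 then y else acc) p0

-- the free pair with the smallest packed key (none if no free pair)
def pvPick (s r : List Int) (U V : List Int) : Option (Nat × Nat) :=
  match pvPL s r U V with
  | [] => none
  | p :: L => some (pvArgmin s r L p)

-- k greedy rounds: does every matched pair stay within distance 10000?
def pvOK (s r : List Int) : Nat → List Int → List Int → Bool
  | 0, _, _ => true
  | k + 1, U, V =>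
    match pvPick s r U V with
    | none => true
    | some p => decide (pvD s r p.1 p.2 < 10000) &&
        pvOK s r k (PySem.Set.add U (p.1 : Int)) (PySem.Set.add V (p.2 : Int))

-- Pre_ excludes exactly the inputs on which A raises ValueError: when standard_y is
-- shorter and at some greedy step every still-unmatched pair is at distance ≥ 10000,
-- A's sentinel `min = 10000` never updates, min_i = min_j = 0 go stale, and
-- `list.remove(0)` raises (0 cannot be in both lists there, since that pair would
-- have distance 0); pvOK walks the greedy matching and checks each matched pair.
def Pre_get_mismatch_line (standard_y : List Int) (recognize_y : List Int) : Prop :=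
  recognize_y.length ≤ standard_y.length ∨
    pvOK standard_y recognize_y standard_y.length [] [] = true
instance (standard_y : List Int) (recognize_y : List Int) : Decidable (Pre_get_mismatch_line standard_y recognize_y) := by unfold Pre_get_mismatch_line; infer_instance

def pvWitness_get_mismatch_line : List Int × List Int := ([3, 10], [1, 4, 9])

def Spec_get_mismatch_line (standard_y : List Int) (recognize_y : List Int) (out : List Int × List Int) : Prop := out = get_mismatch_line_alt standard_y recognize_y
instance (standard_y : List Int) (recognize_y : List Int) (out : List Int × List Int) : Decidable (Spec_get_mismatch_line standard_y recognize_y out) := by unfold Spec_get_mismatch_line; infer_instance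

-- ===== CLAIM (what is proved, stated in full; the proofs are below) =====
def Claim_equal_get_mismatch_line : Prop := ∀ (standard_y : List Int) (recognize_y : List Int), Dom_get_mismatch_line standard_y recognize_y → Pre_get_mismatch_line standard_y recognize_y → Spec_get_mismatch_line standard_y recognize_y (get_mismatch_line standard_y recognize_y)


-- ===== LEMMAS AND PROOFS =====

theorem pv_step (sy ry s' r' : List Int)
    (h0 : ¬ sy.length = ry.length) (h1 : ¬ sy.length > ry.length) (h2 : sy.length ≠ 0)
    (hs : PySem.List.remove? sy (pvAMin sy ry).2.1 = some s')
    (hr : PySem.List.remove? ry (pvAMin sy ry).2.2 = some r') :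
    get_mismatch_line sy ry = get_mismatch_line s' r' := by
  rw [get_mismatch_line, if_neg h0, if_neg h1, if_pos h2]
  dsimp only
  split
  · next s'' r'' heq1 heq2 =>
    rw [hs] at heq1
    rw [hr] at heq2
    cases heq1; cases heq2; rfl
  · next hno => exact absurd hs (by intro h; exact hno s' r' h hr)

-- -------- proof-side machinery: restricted lists, masks, greedy spec --------

-- the sublist of xs at free positions (A's current working list)
def pvRestrict (xs : List Int) (U : List Int) : List Int :=
  (pvFree xs.length U).map (fun i => xs.getD i 0)

-- k rounds of "match the closest still-free pair"; returns the final used-j set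
def pvSpec (s r : List Int) : Nat → List Int → List Int → List Int
  | 0, _, V => V
  | k + 1, U, V =>
    match pvPick s r U V with
    | none => V
    | some p => pvSpec s r k (PySem.Set.add U (p.1 : Int)) (PySem.Set.add V (p.2 : Int))

-- B's scan state step over one code
def pvScan (s r : List Int) (Q : List Int) (st : PySem.Set Int × PySem.Set Int) :
    PySem.Set Int × PySem.Set Int :=
  Q.foldl (fun st c =>
      let k := PySem.Int.mod c ((s.length : Int) * (r.length : Int))
      let ia := PySem.Int.floordiv k (r.length : Int)
      let jb := PySem.Int.mod k (r.length : Int)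
      if !(PySem.Set.contains st.1 ia) && !(PySem.Set.contains st.2 jb)
      then (PySem.Set.add st.1 ia, PySem.Set.add st.2 jb) else st) st

-- ---- basic facts about pvFree / codes ----

theorem pv_mem_free {len : Nat} {U : List Int} {i : Nat} :
    i ∈ pvFree len U ↔ i < len ∧ (i : Int) ∉ U := by
  simp only [pvFree, List.mem_filter, List.mem_range, Bool.not_eq_true']
  constructor
  · rintro ⟨h1, h2⟩
    refine ⟨h1, fun hm => ?_⟩
    rw [(PySem.Set.contains_iff U (i : Int)).mpr hm] at h2
    exact Bool.noConfusion h2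
  · rintro ⟨h1, h2⟩
    refine ⟨h1, ?_⟩
    cases hc : PySem.Set.contains U (i : Int)
    · rfl
    · exact absurd ((PySem.Set.contains_iff U (i : Int)).mp hc) h2

theorem pv_free_pairwise (len : Nat) (U : List Int) : (pvFree len U).Pairwise (· < ·) :=
  List.Pairwise.filter _ List.pairwise_lt_range

theorem pv_free_nodup (len : Nat) (U : List Int) : (pvFree len U).Nodup :=
  (pv_free_pairwise len U).imp Nat.ne_of_lt

theorem pv_idx_lt {n m i j : Nat} (hi : i < n) (hj : j < m) : i * m + j < n * m :=
  calc i * m + j < i * m + m := by omega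
  _ = (i + 1) * m := by ring
  _ ≤ n * m := Nat.mul_le_mul_right m hi

theorem pv_code_lt_of_d_lt {s r : List Int} {p q : Nat × Nat}
    (hp1 : p.1 < s.length) (hp2 : p.2 < r.length)
    (hq1 : q.1 < s.length) (hq2 : q.2 < r.length)
    (hd : pvD s r q.1 q.2 < pvD s r p.1 p.2) :
    pvCodeN s r q.1 q.2 < pvCodeN s r p.1 p.2 := by
  unfold pvCodeN
  have h1 := pv_idx_lt hq1 hq2
  calc pvD s r q.1 q.2 * (s.length * r.length) + (q.1 * r.length + q.2)
      < (pvD s r q.1 q.2 + 1) * (s.length * r.length) := by rw [Nat.succ_mul]; omega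
  _ ≤ pvD s r p.1 p.2 * (s.length * r.length) := Nat.mul_le_mul_right _ hd
  _ ≤ _ := Nat.le_add_right _ _

theorem pv_code_lt_of_lex {s r : List Int} {p q : Nat × Nat}
    (hp2 : p.2 < r.length) (hq2 : q.2 < r.length)
    (hd : pvD s r q.1 q.2 = pvD s r p.1 p.2)
    (hlex : q.1 < p.1 ∨ (q.1 = p.1 ∧ q.2 < p.2)) :
    pvCodeN s r q.1 q.2 < pvCodeN s r p.1 p.2 := by
  have hidx : q.1 * r.length + q.2 < p.1 * r.length + p.2 := by
    rcases hlex with h | ⟨h1, h2⟩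
    · calc q.1 * r.length + q.2 < (q.1 + 1) * r.length := by rw [Nat.succ_mul]; omega
      _ ≤ p.1 * r.length := Nat.mul_le_mul_right _ h
      _ ≤ _ := Nat.le_add_right _ _
    · rw [h1]; omega
  unfold pvCodeN
  rw [hd]
  omega

theorem pv_idx_inj {m i j i' j' : Nat} (hj : j < m) (hj' : j' < m)
    (h : i * m + j = i' * m + j') : i = i' ∧ j = j' := by
  rcases Nat.lt_trichotomy i i' with hlt | heq | hgt
  · exfalso
    have h2 : (i + 1) * m ≤ i' * m := Nat.mul_le_mul_right _ hlt
    rw [Nat.succ_mul] at h2; omega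
  · refine ⟨heq, ?_⟩; rw [heq] at h; omega
  · exfalso
    have h2 : (i' + 1) * m ≤ i * m := Nat.mul_le_mul_right _ hgt
    rw [Nat.succ_mul] at h2; omega

theorem pv_code_inj {s r : List Int} {p q : Nat × Nat}
    (hp1 : p.1 < s.length) (hp2 : p.2 < r.length)
    (hq1 : q.1 < s.length) (hq2 : q.2 < r.length)
    (h : pvCodeN s r p.1 p.2 = pvCodeN s r q.1 q.2) : p = q := by
  have hm : 0 < r.length := by omega
  have hidx : p.1 * r.length + p.2 = q.1 * r.length + q.2 := by
    have h2 := congrArg (· % (s.length * r.length)) h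
    simpa [pvCodeN, Nat.mul_add_mod, Nat.mod_eq_of_lt (pv_idx_lt hp1 hp2),
      Nat.mod_eq_of_lt (pv_idx_lt hq1 hq2)] using h2
  obtain ⟨h1, h2⟩ := pv_idx_inj hp2 hq2 hidx
  exact Prod.ext h1 h2

-- lexicographic order on grid pairs = A's iteration order
def pvLex (p q : Nat × Nat) : Prop := p.1 < q.1 ∨ (p.1 = q.1 ∧ p.2 < q.2)

theorem pv_mem_PL {s r : List Int} {U V : List Int} {p : Nat × Nat} :
    p ∈ pvPL s r U V ↔ p.1 ∈ pvFree s.length U ∧ p.2 ∈ pvFree r.length V := by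
  unfold pvPL
  constructor
  · intro h
    obtain ⟨i, hi, h2⟩ := List.mem_flatMap.mp h
    obtain ⟨j, hj, h3⟩ := List.mem_map.mp h2
    cases h3; exact ⟨hi, hj⟩
  · rintro ⟨h1, h2⟩
    exact List.mem_flatMap.mpr ⟨p.1, h1, List.mem_map.mpr ⟨p.2, h2, rfl⟩⟩

theorem pv_PL_pairwise (s r : List Int) (U V : List Int) :
    (pvPL s r U V).Pairwise pvLex := by
  unfold pvPL
  rw [List.pairwise_flatMap]
  constructor
  · intro i _
    rw [List.pairwise_map]
    exact ((pv_free_pairwise r.length V).imp (fun h => Or.inr ⟨rfl, h⟩))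
  · refine ((pv_free_pairwise s.length U).imp ?_)
    intro a b hab x hx y hy
    obtain ⟨j, _, hj⟩ := List.mem_map.mp hx
    obtain ⟨j', _, hj'⟩ := List.mem_map.mp hy
    cases hj; cases hj'
    exact Or.inl hab

theorem pv_argmin_cons (s r : List Int) (L : List (Nat × Nat)) (p0 q : Nat × Nat) :
    pvArgmin s r (q :: L) p0
      = pvArgmin s r L (if pvCodeN s r q.1 q.2 < pvCodeN s r p0.1 p0.2 then q else p0) := rfl

theorem pv_argmin_mem (s r : List Int) (L : List (Nat × Nat)) (p0 : Nat × Nat) :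
    pvArgmin s r L p0 ∈ p0 :: L := by
  induction L generalizing p0 with
  | nil => exact List.mem_singleton.mpr rfl
  | cons q L ih =>
    rw [pv_argmin_cons]
    by_cases h : pvCodeN s r q.1 q.2 < pvCodeN s r p0.1 p0.2
    · rw [if_pos h]
      have h2 := ih q
      simp only [List.mem_cons] at h2 ⊢
      tauto
    · rw [if_neg h]
      have h2 := ih p0
      simp only [List.mem_cons] at h2 ⊢
      tauto

theorem pv_argmin_le (s r : List Int) (L : List (Nat × Nat)) (p0 : Nat × Nat) :
    ∀ q ∈ p0 :: L,
      pvCodeN s r (pvArgmin s r L p0).1 (pvArgmin s r L p0).2 ≤ pvCodeN s r q.1 q.2 := by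
  induction L generalizing p0 with
  | nil =>
    intro q hq
    rw [List.mem_singleton.mp hq]
    exact Nat.le_refl _
  | cons c L ih =>
    intro q hq
    rw [pv_argmin_cons]
    by_cases h : pvCodeN s r c.1 c.2 < pvCodeN s r p0.1 p0.2
    · rw [if_pos h]
      rcases List.mem_cons.mp hq with rfl | h1
      · exact Nat.le_of_lt (Nat.lt_of_le_of_lt (ih c c List.mem_cons_self) h)
      · exact ih c q h1
    · rw [if_neg h]
      rcases List.mem_cons.mp hq with rfl | h1
      · exact ih q q List.mem_cons_self
      · rcases List.mem_cons.mp h1 with rfl | h2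
        · exact Nat.le_trans (ih p0 p0 List.mem_cons_self) (Nat.le_of_not_lt h)
        · exact ih p0 q (List.mem_cons.mpr (Or.inr h2))

-- the argmin is the unique element of minimal packed key
theorem pv_argmin_eq_of_min (s r : List Int) (L : List (Nat × Nat)) (p0 x : Nat × Nat)
    (hx : x ∈ p0 :: L)
    (hmin : ∀ q ∈ p0 :: L, pvCodeN s r x.1 x.2 ≤ pvCodeN s r q.1 q.2)
    (hb : ∀ q ∈ p0 :: L, q.1 < s.length ∧ q.2 < r.length) :
    pvArgmin s r L p0 = x := by
  have hmem := pv_argmin_mem s r L p0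
  have h1 := pv_argmin_le s r L p0 x hx
  have h2 := hmin _ hmem
  have hbx := hb x hx
  have hba := hb _ hmem
  exact pv_code_inj hba.1 hba.2 hbx.1 hbx.2 (Nat.le_antisymm h1 h2)

-- generic: a nested foldl is the foldl over the row-major product list
theorem pv_foldl_nest {α β σ : Type} (xs : List α) (ys : List β) (g : σ → α → β → σ) (init : σ) :
    xs.foldl (fun acc a => ys.foldl (fun acc2 b => g acc2 a b) acc) init
      = (xs.flatMap (fun a => ys.map (fun b => (a, b)))).foldl (fun acc p => g acc p.1 p.2) init := by
  induction xs generalizing init with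
  | nil => rfl
  | cons a xs ih => simp [List.flatMap_cons, List.foldl_append, List.foldl_map, ih]

theorem pv_prod_eq (s r : List Int) (U V : List Int) :
    (pvRestrict s U).flatMap (fun a => (pvRestrict r V).map (fun b => (a, b)))
      = (pvPL s r U V).map (fun p => (s.getD p.1 0, r.getD p.2 0)) := by
  unfold pvRestrict pvPL
  rw [List.flatMap_map, List.map_flatMap]
  simp only [List.map_map]
  rfl

theorem pv_cmp_iff {s r : List Int} {p q : Nat × Nat}
    (hp1 : p.1 < s.length) (hp2 : p.2 < r.length)
    (hq1 : q.1 < s.length) (hq2 : q.2 < r.length)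
    (hlex : pvLex p q) :
    pvD s r q.1 q.2 < pvD s r p.1 p.2 ↔ pvCodeN s r q.1 q.2 < pvCodeN s r p.1 p.2 := by
  constructor
  · exact fun h => pv_code_lt_of_d_lt hp1 hp2 hq1 hq2 h
  · intro hc
    by_contra h
    rcases Nat.lt_or_ge (pvD s r p.1 p.2) (pvD s r q.1 q.2) with h2 | h2
    · exact Nat.lt_asymm hc (pv_code_lt_of_d_lt hq1 hq2 hp1 hp2 h2)
    · have hd : pvD s r p.1 p.2 = pvD s r q.1 q.2 := by omega
      exact Nat.lt_asymm hc (pv_code_lt_of_lex hq2 hp2 hd hlex)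

theorem pv_abs_cast (s r : List Int) (i j : Nat) :
    |s.getD i 0 - r.getD j 0| = ((pvD s r i j : Nat) : Int) := Int.abs_eq_natAbs _

-- A's running-minimum fold over the pair list, started at a candidate, lands on the
-- key-argmin: comparisons by distance agree with comparisons by packed key because
-- the list is lexicographically increasing.
theorem pv_foldpair (s r : List Int) (L : List (Nat × Nat)) :
    ∀ p0 : Nat × Nat, L.Pairwise pvLex → (∀ q ∈ L, pvLex p0 q) →
    p0.1 < s.length → p0.2 < r.length → (∀ q ∈ L, q.1 < s.length ∧ q.2 < r.length) →
    L.foldl (fun acc q => if ((pvD s r q.1 q.2 : Nat) : Int) < acc.1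
        then (((pvD s r q.1 q.2 : Nat) : Int), s.getD q.1 0, r.getD q.2 0) else acc)
      (((pvD s r p0.1 p0.2 : Nat) : Int), s.getD p0.1 0, r.getD p0.2 0)
    = (((pvD s r (pvArgmin s r L p0).1 (pvArgmin s r L p0).2 : Nat) : Int),
        s.getD (pvArgmin s r L p0).1 0, r.getD (pvArgmin s r L p0).2 0) := by
  induction L with
  | nil => intro p0 _ _ _ _ _; rfl
  | cons q L ih =>
    intro p0 hpw hall hb1 hb2 hbL
    rw [List.foldl_cons, pv_argmin_cons]
    have hlex : pvLex p0 q := hall q List.mem_cons_self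
    have hbq := hbL q List.mem_cons_self
    have hpwt := (List.pairwise_cons.mp hpw)
    by_cases h : pvD s r q.1 q.2 < pvD s r p0.1 p0.2
    · have hc : pvCodeN s r q.1 q.2 < pvCodeN s r p0.1 p0.2 :=
        (pv_cmp_iff hb1 hb2 hbq.1 hbq.2 hlex).mp h
      rw [if_pos (show ((pvD s r q.1 q.2 : Nat) : Int) < ((pvD s r p0.1 p0.2 : Nat) : Int) by
        exact_mod_cast h), if_pos hc]
      exact ih q hpwt.2 hpwt.1 hbq.1 hbq.2 (fun y hy => hbL y (List.mem_cons.mpr (Or.inr hy)))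
    · have hc : ¬ pvCodeN s r q.1 q.2 < pvCodeN s r p0.1 p0.2 :=
        fun hcc => h ((pv_cmp_iff hb1 hb2 hbq.1 hbq.2 hlex).mpr hcc)
      rw [if_neg (show ¬ ((pvD s r q.1 q.2 : Nat) : Int) < ((pvD s r p0.1 p0.2 : Nat) : Int) by
        exact_mod_cast h), if_neg hc]
      exact ih p0 hpwt.2 (fun y hy => hall y (List.mem_cons.mpr (Or.inr hy))) hb1 hb2
        (fun y hy => hbL y (List.mem_cons.mpr (Or.inr hy)))

-- the same fold started at A's sentinel (10000, 0, 0): as soon as the argmin's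
-- distance beats the sentinel, the fold lands on the argmin's triple
theorem pv_fold_sent (s r : List Int) :
    ∀ (L : List (Nat × Nat)) (p0 : Nat × Nat),
      (p0 :: L).Pairwise pvLex →
      (∀ q ∈ p0 :: L, q.1 < s.length ∧ q.2 < r.length) →
      pvD s r (pvArgmin s r L p0).1 (pvArgmin s r L p0).2 < 10000 →
      (p0 :: L).foldl (fun acc q => if ((pvD s r q.1 q.2 : Nat) : Int) < acc.1
          then (((pvD s r q.1 q.2 : Nat) : Int), s.getD q.1 0, r.getD q.2 0) else acc)
        ((10000 : Int), (0 : Int), (0 : Int))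
      = (((pvD s r (pvArgmin s r L p0).1 (pvArgmin s r L p0).2 : Nat) : Int),
          s.getD (pvArgmin s r L p0).1 0, r.getD (pvArgmin s r L p0).2 0) := by
  intro L
  induction L with
  | nil =>
    intro p0 _ _ hlt
    rw [List.foldl_cons]
    rw [if_pos (show ((pvD s r p0.1 p0.2 : Nat) : Int) < (10000 : Int) by exact_mod_cast hlt)]
    rfl
  | cons q L' ih =>
    intro p0 hpw hb hlt
    rw [List.foldl_cons]
    by_cases hD0 : pvD s r p0.1 p0.2 < 10000
    · rw [if_pos (show ((pvD s r p0.1 p0.2 : Nat) : Int) < (10000 : Int) by exact_mod_cast hD0)]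
      exact pv_foldpair s r (q :: L') p0 (List.pairwise_cons.mp hpw).2
        (List.pairwise_cons.mp hpw).1
        (hb p0 List.mem_cons_self).1 (hb p0 List.mem_cons_self).2
        (fun y hy => hb y (List.mem_cons.mpr (Or.inr hy)))
    · rw [if_neg (show ¬ ((pvD s r p0.1 p0.2 : Nat) : Int) < (10000 : Int) by exact_mod_cast hD0)]
      have hamem : pvArgmin s r (q :: L') p0 ∈ p0 :: q :: L' := pv_argmin_mem s r (q :: L') p0
      have hane : pvArgmin s r (q :: L') p0 ≠ p0 := by
        intro h; rw [h] at hlt; exact hD0 hlt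
      have hamem' : pvArgmin s r (q :: L') p0 ∈ q :: L' := by
        rcases List.mem_cons.mp hamem with h | h
        · exact absurd h hane
        · exact h
      have heq : pvArgmin s r L' q = pvArgmin s r (q :: L') p0 :=
        pv_argmin_eq_of_min s r L' q _ hamem'
          (fun y hy => pv_argmin_le s r (q :: L') p0 y (List.mem_cons.mpr (Or.inr hy)))
          (fun y hy => hb y (List.mem_cons.mpr (Or.inr hy)))
      rw [← heq]
      exact ih q (List.pairwise_cons.mp hpw).2
        (fun y hy => hb y (List.mem_cons.mpr (Or.inr hy))) (by rw [heq]; exact hlt)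

theorem pv_mem_PL_of_eq {s r U V : List Int} {p0 : Nat × Nat} {L : List (Nat × Nat)}
    (hPL : pvPL s r U V = p0 :: L) :
    ∀ q ∈ p0 :: L, q.1 ∈ pvFree s.length U ∧ q.2 ∈ pvFree r.length V := by
  intro q hq
  exact pv_mem_PL.mp (by rw [hPL]; exact hq)

-- A's sentinel double loop on the restricted lists returns distance and values of the
-- free pair with the least packed key, provided that pair is within 10000.
theorem pv_aMin_sent (s r U V : List Int) {p0 : Nat × Nat} {L : List (Nat × Nat)}
    (hPL : pvPL s r U V = p0 :: L)
    (hlt : pvD s r (pvArgmin s r L p0).1 (pvArgmin s r L p0).2 < 10000) :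
    pvAMin (pvRestrict s U) (pvRestrict r V)
      = (((pvD s r (pvArgmin s r L p0).1 (pvArgmin s r L p0).2 : Nat) : Int),
          s.getD (pvArgmin s r L p0).1 0, r.getD (pvArgmin s r L p0).2 0) := by
  have hmem := pv_mem_PL_of_eq hPL
  have hpw : (p0 :: L).Pairwise pvLex := hPL ▸ pv_PL_pairwise s r U V
  unfold pvAMin
  rw [pv_foldl_nest, pv_prod_eq, List.foldl_map, hPL]
  simp only [pv_abs_cast]
  exact pv_fold_sent s r L p0 hpw
    (fun y hy => ⟨(pv_mem_free.mp (hmem y hy).1).1, (pv_mem_free.mp (hmem y hy).2).1⟩) hlt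

-- ---- removing the matched index from a mask ----

theorem pv_free_add (len : Nat) (U : List Int) (k : Nat) :
    pvFree len (PySem.Set.add U (k : Int)) = (pvFree len U).filter (fun i => !(i == k)) := by
  unfold pvFree
  rw [List.filter_filter]
  apply List.filter_congr
  intro i _
  simp only [PySem.Set.contains_eq_decide, PySem.Set.mem_add]
  by_cases h1 : (i : Int) ∈ U
  · simp [h1]
  · by_cases h2 : i = k
    · simp [h1, h2]
    · have h3 : ¬ ((i : Int) = (k : Int)) := fun hc => h2 (Nat.cast_injective hc)
      simp [h1, h2, h3]

theorem pv_filter_ne_of_decomp {L1 L2 : List Nat} {k : Nat}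
    (h1 : k ∉ L1) (h2 : k ∉ L2) :
    (L1 ++ k :: L2).filter (fun i => !(i == k)) = L1 ++ L2 := by
  have hA : ∀ a ∈ L1, (!(a == k)) = true := by
    intro a ha
    have : a ≠ k := fun hc => h1 (hc ▸ ha)
    simp [this]
  have hB : ∀ a ∈ L2, (!(a == k)) = true := by
    intro a ha
    have : a ≠ k := fun hc => h2 (hc ▸ ha)
    simp [this]
  simp [List.filter_append, List.filter_cons, List.filter_eq_self.mpr hA,
    List.filter_eq_self.mpr hB]

theorem pv_remove_map {f : Nat → Int} {L1 L2 : List Nat} {k : Nat}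
    (h1 : ∀ i ∈ L1, f i ≠ f k) :
    PySem.List.remove? ((L1 ++ k :: L2).map f) (f k) = some ((L1 ++ L2).map f) := by
  induction L1 with
  | nil => simp [PySem.List.remove?_cons_self]
  | cons a L1 ih =>
    rw [List.cons_append, List.map_cons,
      PySem.List.remove?_cons_of_ne _ (h1 a List.mem_cons_self),
      ih (fun i hi => h1 i (List.mem_cons.mpr (Or.inr hi)))]
    rfl

-- Python's value-based `.remove` of the matched minimum removes exactly the matched
-- position: no earlier free position can carry the same value (it would beat the argmin).
theorem pv_remove_left (s r U V : List Int) {p0 : Nat × Nat} {L : List (Nat × Nat)}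
    (hPL : pvPL s r U V = p0 :: L) :
    PySem.List.remove? (pvRestrict s U) (s.getD (pvArgmin s r L p0).1 0)
        = some (pvRestrict s (PySem.Set.add U ((pvArgmin s r L p0).1 : Int)))
      ∧ (pvRestrict s (PySem.Set.add U ((pvArgmin s r L p0).1 : Int))).length + 1
        = (pvRestrict s U).length := by
  set a := pvArgmin s r L p0 with ha
  have haPL : a ∈ p0 :: L := pv_argmin_mem s r L p0
  have haF := pv_mem_PL.mp (show a ∈ pvPL s r U V by rw [hPL]; exact haPL)
  have ha2 : a.2 < r.length := (pv_mem_free.mp haF.2).1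
  obtain ⟨L1, L2, hdec⟩ := List.append_of_mem haF.1
  have hnd := pv_free_nodup s.length U
  rw [hdec] at hnd
  obtain ⟨nd1, nd2, hdisj⟩ := List.nodup_append.mp hnd
  have hk2 : a.1 ∉ L2 := (List.nodup_cons.mp nd2).1
  have hk1 : a.1 ∉ L1 := fun hm => hdisj a.1 hm a.1 List.mem_cons_self rfl
  have hpw := pv_free_pairwise s.length U
  rw [hdec] at hpw
  have hlt : ∀ i ∈ L1, i < a.1 := fun i hi =>
    (List.pairwise_append.mp hpw).2.2 i hi a.1 List.mem_cons_self
  have hne : ∀ i ∈ L1, s.getD i 0 ≠ s.getD a.1 0 := by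
    intro i hi heq
    have hiF : i ∈ pvFree s.length U := by
      rw [hdec]; exact List.mem_append.mpr (Or.inl hi)
    have hqPL : (i, a.2) ∈ p0 :: L := by
      rw [← hPL]; exact pv_mem_PL.mpr ⟨hiF, haF.2⟩
    have hd : pvD s r i a.2 = pvD s r a.1 a.2 := by unfold pvD; rw [heq]
    have hcode : pvCodeN s r i a.2 < pvCodeN s r a.1 a.2 :=
      @pv_code_lt_of_lex s r a (i, a.2) ha2 ha2 hd (Or.inl (hlt i hi))
    have hle := pv_argmin_le s r L p0 (i, a.2) hqPL
    rw [← ha] at hle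
    simp only [] at hle
    omega
  have hres : pvRestrict s U = (L1 ++ a.1 :: L2).map (fun i => s.getD i 0) := by
    unfold pvRestrict; rw [hdec]
  have hres' : pvRestrict s (PySem.Set.add U (a.1 : Int))
      = (L1 ++ L2).map (fun i => s.getD i 0) := by
    unfold pvRestrict
    rw [pv_free_add, hdec, pv_filter_ne_of_decomp hk1 hk2]
  constructor
  · rw [hres, hres']
    exact pv_remove_map hne
  · rw [hres, hres']
    simp
    omega

theorem pv_remove_right (s r U V : List Int) {p0 : Nat × Nat} {L : List (Nat × Nat)}
    (hPL : pvPL s r U V = p0 :: L) :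
    PySem.List.remove? (pvRestrict r V) (r.getD (pvArgmin s r L p0).2 0)
        = some (pvRestrict r (PySem.Set.add V ((pvArgmin s r L p0).2 : Int)))
      ∧ (pvRestrict r (PySem.Set.add V ((pvArgmin s r L p0).2 : Int))).length + 1
        = (pvRestrict r V).length := by
  set a := pvArgmin s r L p0 with ha
  have haPL : a ∈ p0 :: L := pv_argmin_mem s r L p0
  have haF := pv_mem_PL.mp (show a ∈ pvPL s r U V by rw [hPL]; exact haPL)
  have ha2 : a.2 < r.length := (pv_mem_free.mp haF.2).1
  obtain ⟨L1, L2, hdec⟩ := List.append_of_mem haF.2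
  have hnd := pv_free_nodup r.length V
  rw [hdec] at hnd
  obtain ⟨nd1, nd2, hdisj⟩ := List.nodup_append.mp hnd
  have hk2 : a.2 ∉ L2 := (List.nodup_cons.mp nd2).1
  have hk1 : a.2 ∉ L1 := fun hm => hdisj a.2 hm a.2 List.mem_cons_self rfl
  have hpw := pv_free_pairwise r.length V
  rw [hdec] at hpw
  have hlt : ∀ j ∈ L1, j < a.2 := fun j hj =>
    (List.pairwise_append.mp hpw).2.2 j hj a.2 List.mem_cons_self
  have hne : ∀ j ∈ L1, r.getD j 0 ≠ r.getD a.2 0 := by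
    intro j hj heq
    have hjF : j ∈ pvFree r.length V := by
      rw [hdec]; exact List.mem_append.mpr (Or.inl hj)
    have hjlt : j < r.length := (pv_mem_free.mp hjF).1
    have hqPL : (a.1, j) ∈ p0 :: L := by
      rw [← hPL]; exact pv_mem_PL.mpr ⟨haF.1, hjF⟩
    have hd : pvD s r a.1 j = pvD s r a.1 a.2 := by unfold pvD; rw [heq]
    have hcode : pvCodeN s r a.1 j < pvCodeN s r a.1 a.2 :=
      @pv_code_lt_of_lex s r a (a.1, j) ha2 hjlt hd (Or.inr ⟨rfl, hlt j hj⟩)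
    have hle := pv_argmin_le s r L p0 (a.1, j) hqPL
    rw [← ha] at hle
    simp only [] at hle
    omega
  have hres : pvRestrict r V = (L1 ++ a.2 :: L2).map (fun j => r.getD j 0) := by
    unfold pvRestrict; rw [hdec]
  have hres' : pvRestrict r (PySem.Set.add V (a.2 : Int))
      = (L1 ++ L2).map (fun j => r.getD j 0) := by
    unfold pvRestrict
    rw [pv_free_add, hdec, pv_filter_ne_of_decomp hk1 hk2]
  constructor
  · rw [hres, hres']
    exact pv_remove_map hne
  · rw [hres, hres']
    simp
    omega

-- ---- the greedy specification ----

theorem pv_spec_pick_none {s r U V : List Int} (h : pvPick s r U V = none) :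
    ∀ k, pvSpec s r k U V = V := by
  intro k
  cases k with
  | zero => rfl
  | succ k => simp [pvSpec, h]

theorem pv_restrict_len (xs U : List Int) :
    (pvRestrict xs U).length = (pvFree xs.length U).length := by
  simp [pvRestrict]

theorem pv_PL_nil_iff (s r U V : List Int) :
    pvPL s r U V = [] ↔ pvFree s.length U = [] ∨ pvFree r.length V = [] := by
  unfold pvPL
  simp [List.flatMap_eq_nil_iff, List.map_eq_nil_iff]
  constructor
  · intro h
    rcases List.eq_nil_or_concat (pvFree s.length U) with h1 | ⟨l', i, hci⟩
    · exact Or.inl h1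
    · exact Or.inr (h i (by rw [hci]; simp))
  · intro h i hi
    rcases h with h | h
    · rw [h] at hi; cases hi
    · exact h

-- A's recursion on the restricted lists computes the greedy spec, as long as every
-- greedily matched pair stays within the sentinel (pvOK).
theorem pv_A_main (s r : List Int) :
    ∀ (k : Nat) (U V : List Int), (pvRestrict s U).length = k →
      k < (pvRestrict r V).length → pvOK s r k U V = true →
      get_mismatch_line (pvRestrict s U) (pvRestrict r V)
        = ([], pvRestrict r (pvSpec s r k U V)) := by
  intro k
  induction k with
  | zero =>
    intro U V hlen hlt _
    have hs : pvRestrict s U = [] := List.length_eq_zero_iff.mp hlen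
    rw [hs, get_mismatch_line]
    rw [if_neg (by simp; omega), if_neg (by simp), if_neg (by simp)]
    rfl
  | succ k ih =>
    intro U V hlen hlt hOK
    have hI : pvFree s.length U ≠ [] := by
      intro h
      rw [pv_restrict_len, h] at hlen
      simp at hlen
    have hJ : pvFree r.length V ≠ [] := by
      intro h
      rw [pv_restrict_len, h] at hlt
      simp at hlt
    have hPLne : pvPL s r U V ≠ [] := by
      intro h
      rcases (pv_PL_nil_iff s r U V).mp h with h | h
      · exact hI h
      · exact hJ h
    obtain ⟨p0, L, hPL⟩ := List.exists_cons_of_ne_nil hPLne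
    have hpick : pvPick s r U V = some (pvArgmin s r L p0) := by
      unfold pvPick; rw [hPL]
    simp only [pvOK, hpick, Bool.and_eq_true, decide_eq_true_eq] at hOK
    obtain ⟨hd, hOK'⟩ := hOK
    have hrl := pv_remove_left s r U V hPL
    have hrr := pv_remove_right s r U V hPL
    have e1 : (pvAMin (pvRestrict s U) (pvRestrict r V)).2.1
        = s.getD (pvArgmin s r L p0).1 0 := by rw [pv_aMin_sent s r U V hPL hd]
    have e2 : (pvAMin (pvRestrict s U) (pvRestrict r V)).2.2
        = r.getD (pvArgmin s r L p0).2 0 := by rw [pv_aMin_sent s r U V hPL hd]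
    have hs := hrl.1
    have hr := hrr.1
    rw [← e1] at hs
    rw [← e2] at hr
    rw [pv_step (pvRestrict s U) (pvRestrict r V) _ _ (by omega) (by omega) (by omega) hs hr]
    rw [ih _ _ (by omega) (by omega) hOK']
    have hspec : pvSpec s r (k + 1) U V
        = pvSpec s r k (PySem.Set.add U ((pvArgmin s r L p0).1 : Int))
            (PySem.Set.add V ((pvArgmin s r L p0).2 : Int)) := by
      simp [pvSpec, hpick]
    rw [hspec]

-- ---- the B side ----

def pvCodes (s r : List Int) : List Int :=
  (pvPL s r [] []).map (fun p => ((pvCodeN s r p.1 p.2 : Nat) : Int))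

theorem pv_free_nil (len : Nat) : pvFree len [] = List.range len := by
  unfold pvFree
  apply List.filter_eq_self.mpr
  intro i _
  simp [PySem.Set.contains_eq_decide, PySem.Set.empty]

theorem pv_restrict_nil (xs : List Int) : pvRestrict xs [] = xs := by
  unfold pvRestrict
  rw [pv_free_nil]
  apply List.ext_getElem
  · simp
  · intro i h1 h2
    simp [List.getD_eq_getElem, List.getElem?_eq_getElem h2]

theorem pv_PL_len (s r U V : List Int) :
    (pvPL s r U V).length = (pvFree s.length U).length * (pvFree r.length V).length := by
  unfold pvPL
  rw [List.length_flatMap]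
  simp [Nat.mul_comm]

theorem pv_codes_len (s r : List Int) : (pvCodes s r).length = s.length * r.length := by
  unfold pvCodes
  rw [List.length_map, pv_PL_len, pv_free_nil, pv_free_nil]
  simp

theorem pv_codes_mem (s r : List Int) {c : Int} (hc : c ∈ pvCodes s r) :
    ∃ i j : Nat, i < s.length ∧ j < r.length ∧ c = ((pvCodeN s r i j : Nat) : Int) := by
  obtain ⟨p, hp, rfl⟩ := List.mem_map.mp hc
  have h := pv_mem_PL.mp hp
  exact ⟨p.1, p.2, (pv_mem_free.mp h.1).1, (pv_mem_free.mp h.2).1, rfl⟩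

theorem pv_mem_codes (s r : List Int) {i j : Nat} (hi : i < s.length) (hj : j < r.length) :
    ((pvCodeN s r i j : Nat) : Int) ∈ pvCodes s r := by
  apply List.mem_map.mpr
  refine ⟨(i, j), ?_, rfl⟩
  apply pv_mem_PL.mpr
  rw [pv_free_nil, pv_free_nil]
  exact ⟨List.mem_range.mpr hi, List.mem_range.mpr hj⟩

theorem pv_PL_codes_nodup (s r U V : List Int) :
    ((pvPL s r U V).map (fun p => ((pvCodeN s r p.1 p.2 : Nat) : Int))).Nodup := by
  rw [List.nodup_map_iff_inj_on]
  · intro p hp q hq hpq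
    have h1 := pv_mem_PL.mp hp
    have h2 := pv_mem_PL.mp hq
    exact pv_code_inj (pv_mem_free.mp h1.1).1 (pv_mem_free.mp h1.2).1
      (pv_mem_free.mp h2.1).1 (pv_mem_free.mp h2.2).1 (by exact_mod_cast hpq)
  · exact (pv_PL_pairwise s r U V).imp (fun {a b} h => by
      rcases h with h | ⟨h1, h2⟩ <;> intro hc <;> cases hc <;> omega)

theorem pv_codes_nodup (s r : List Int) : (pvCodes s r).Nodup :=
  pv_PL_codes_nodup s r [] []

theorem pv_mem_free_add {len : Nat} {U : List Int} {i k : Nat} :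
    i ∈ pvFree len (PySem.Set.add U (k : Int)) ↔ i ∈ pvFree len U ∧ i ≠ k := by
  rw [pv_free_add, List.mem_filter]
  simp

-- decoding the packed code with Python's floor division / modulo
theorem pv_decode (s r : List Int) {i j : Nat} (hm : 0 < r.length)
    (hi : i < s.length) (hj : j < r.length) :
    PySem.Int.mod ((pvCodeN s r i j : Nat) : Int) ((s.length : Int) * (r.length : Int))
        = ((i * r.length + j : Nat) : Int)
    ∧ PySem.Int.floordiv ((i * r.length + j : Nat) : Int) (r.length : Int) = (i : Int)
    ∧ PySem.Int.mod ((i * r.length + j : Nat) : Int) (r.length : Int) = (j : Int) := by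
  have hb : ((s.length : Int) * (r.length : Int)) = ((s.length * r.length : Nat) : Int) := by
    push_cast; ring
  refine ⟨?_, ?_, ?_⟩
  · rw [hb, PySem.Int.mod_natCast]
    congr 1
    unfold pvCodeN
    rw [Nat.mul_comm (pvD s r i j) (s.length * r.length), Nat.mul_add_mod,
      Nat.mod_eq_of_lt (pv_idx_lt hi hj)]
  · rw [PySem.Int.floordiv_natCast]
    congr 1
    rw [Nat.mul_comm i r.length, Nat.mul_add_div hm, Nat.div_eq_of_lt hj]
    omega
  · rw [PySem.Int.mod_natCast]
    congr 1
    rw [Nat.mul_comm i r.length, Nat.mul_add_mod, Nat.mod_eq_of_lt hj]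

theorem pv_free_add_len {len : Nat} {U : List Int} {k : Nat} (hk : k ∈ pvFree len U) :
    (pvFree len (PySem.Set.add U (k : Int))).length + 1 = (pvFree len U).length := by
  obtain ⟨L1, L2, hdec⟩ := List.append_of_mem hk
  have hnd := pv_free_nodup len U
  rw [hdec] at hnd
  obtain ⟨nd1, nd2, hdisj⟩ := List.nodup_append.mp hnd
  have hk2 : k ∉ L2 := (List.nodup_cons.mp nd2).1
  have hk1 : k ∉ L1 := fun hm => hdisj k hm k List.mem_cons_self rfl
  rw [pv_free_add, hdec, pv_filter_ne_of_decomp hk1 hk2]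
  simp
  omega

theorem pv_pick_mem {s r U V : List Int} {p : Nat × Nat}
    (h : pvPick s r U V = some p) : p ∈ pvPL s r U V := by
  unfold pvPick at h
  split at h
  · cases h
  · next p0 L hPL =>
    cases h
    rw [hPL]
    exact pv_argmin_mem s r L p0

theorem pv_spec_stable (s r : List Int) :
    ∀ (k k' : Nat) (U V : List Int), (pvFree s.length U).length ≤ k → k ≤ k' →
      pvSpec s r k U V = pvSpec s r k' U V := by
  intro k
  induction k with
  | zero =>
    intro k' U V hle _
    have hI : pvFree s.length U = [] := List.length_eq_zero_iff.mp (by omega)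
    have hpick : pvPick s r U V = none := by
      unfold pvPick
      split
      · rfl
      · next p0 L hPL =>
        exfalso
        have : p0 ∈ pvPL s r U V := by rw [hPL]; exact List.mem_cons_self
        have := (pv_mem_PL.mp this).1
        rw [hI] at this
        cases this
    rw [pv_spec_pick_none hpick, pv_spec_pick_none hpick]
  | succ k ih =>
    intro k' U V hle hk'
    obtain ⟨k'', rfl⟩ : ∃ k'', k' = k'' + 1 := ⟨k' - 1, by omega⟩
    cases hpick : pvPick s r U V with
    | none => rw [pv_spec_pick_none hpick, pv_spec_pick_none hpick]
    | some p =>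
      have hmem := pv_mem_PL.mp (pv_pick_mem hpick)
      simp only [pvSpec, hpick]
      exact ih k'' _ _ (by have := pv_free_add_len hmem.1; omega) (by omega)

-- B's single scan over a sorted list of codes performs the iterated greedy pick.
theorem pv_scan_eq (s r : List Int) (hm : 0 < r.length) :
    ∀ (Q : List Int) (U V : List Int),
      Q.Pairwise (· < ·) →
      (∀ c ∈ Q, c ∈ pvCodes s r) →
      (∀ i j : Nat, i < s.length → j < r.length →
        ((pvCodeN s r i j : Nat) : Int) ∉ Q →
        ¬(i ∈ pvFree s.length U ∧ j ∈ pvFree r.length V)) →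
      (pvScan s r Q (U, V)).2 = pvSpec s r Q.length U V := by
  intro Q
  induction Q with
  | nil => intro U V _ _ _; rfl
  | cons c Q ih =>
    intro U V hpw hQ h3
    obtain ⟨i, j, hi, hj, rfl⟩ := pv_codes_mem s r (hQ c List.mem_cons_self)
    obtain ⟨hd1, hd2, hd3⟩ := pv_decode s r hm hi hj
    unfold pvScan
    rw [List.foldl_cons]
    dsimp only
    rw [hd1, hd2, hd3]
    by_cases hfree : i ∈ pvFree s.length U ∧ j ∈ pvFree r.length V
    · -- the pair of the head code is still free: it is the greedy pick
      have hcU : PySem.Set.contains U (i : Int) = false := by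
        have := (pv_mem_free.mp hfree.1).2
        simp [PySem.Set.contains_eq_decide, this]
      have hcV : PySem.Set.contains V (j : Int) = false := by
        have := (pv_mem_free.mp hfree.2).2
        simp [PySem.Set.contains_eq_decide, this]
      rw [if_pos (by rw [hcU, hcV]; rfl)]
      have hPLmem : (i, j) ∈ pvPL s r U V := pv_mem_PL.mpr hfree
      obtain ⟨p0, L, hPL⟩ := List.exists_cons_of_ne_nil (List.ne_nil_of_mem hPLmem)
      have haPL : pvArgmin s r L p0 ∈ pvPL s r U V := by
        rw [hPL]; exact pv_argmin_mem s r L p0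
      have haF := pv_mem_PL.mp haPL
      have hb1 : (pvArgmin s r L p0).1 < s.length := (pv_mem_free.mp haF.1).1
      have hb2 : (pvArgmin s r L p0).2 < r.length := (pv_mem_free.mp haF.2).1
      have le1 : pvCodeN s r (pvArgmin s r L p0).1 (pvArgmin s r L p0).2 ≤ pvCodeN s r i j :=
        pv_argmin_le s r L p0 (i, j) (by rw [← hPL]; exact hPLmem)
      have hin : ((pvCodeN s r (pvArgmin s r L p0).1 (pvArgmin s r L p0).2 : Nat) : Int)
          ∈ ((pvCodeN s r i j : Nat) : Int) :: Q := by
        by_contra hni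
        exact h3 _ _ hb1 hb2 hni ⟨haF.1, haF.2⟩
      have le2 : pvCodeN s r i j ≤ pvCodeN s r (pvArgmin s r L p0).1 (pvArgmin s r L p0).2 := by
        rcases List.mem_cons.mp hin with he | hq
        · have : pvCodeN s r (pvArgmin s r L p0).1 (pvArgmin s r L p0).2 = pvCodeN s r i j := by
            exact_mod_cast he
          omega
        · have := (List.pairwise_cons.mp hpw).1 _ hq
          have : (pvCodeN s r i j : Int) < (pvCodeN s r (pvArgmin s r L p0).1 (pvArgmin s r L p0).2 : Int) := by
            exact_mod_cast this
          exact_mod_cast Int.le_of_lt this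
      have haeq : pvArgmin s r L p0 = (i, j) :=
        pv_code_inj hb1 hb2 hi hj (Nat.le_antisymm le1 le2)
      have hpick : pvPick s r U V = some (i, j) := by
        unfold pvPick
        rw [hPL]
        show some (pvArgmin s r L p0) = some (i, j)
        rw [haeq]
      have hspec : pvSpec s r (Q.length + 1) U V
          = pvSpec s r Q.length (PySem.Set.add U (i : Int)) (PySem.Set.add V (j : Int)) := by
        simp [pvSpec, hpick]
      rw [List.length_cons, hspec]
      apply ih
      · exact (List.pairwise_cons.mp hpw).2
      · exact fun c hc => hQ c (List.mem_cons.mpr (Or.inr hc))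
      · intro i' j' hi' hj' hni' hfree'
        have hfi' := pv_mem_free_add.mp hfree'.1
        have hfj' := pv_mem_free_add.mp hfree'.2
        by_cases hin' : ((pvCodeN s r i' j' : Nat) : Int) ∈ ((pvCodeN s r i j : Nat) : Int) :: Q
        · rcases List.mem_cons.mp hin' with he | hq
          · have : (i', j') = ((i, j) : Nat × Nat) :=
              pv_code_inj hi' hj' hi hj (by exact_mod_cast he)
            exact hfi'.2 (by cases this; rfl)
          · exact hni' hq
        · exact h3 i' j' hi' hj' hin' ⟨hfi'.1, hfj'.1⟩
    · -- the head code's pair is already used: the scan skips it and nothing changes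
      have hcond : (!(PySem.Set.contains U (i : Int)) && !(PySem.Set.contains V (j : Int))) = false := by
        rcases not_and_or.mp hfree with h | h
        · have : (i : Int) ∈ U := by
            by_contra hni
            exact h (pv_mem_free.mpr ⟨hi, hni⟩)
          simp [PySem.Set.contains_eq_decide, this]
        · have : (j : Int) ∈ V := by
            by_contra hni
            exact h (pv_mem_free.mpr ⟨hj, hni⟩)
          simp [PySem.Set.contains_eq_decide, this]
      rw [if_neg (by rw [hcond]; exact Bool.false_ne_true)]
      have hscan : (pvScan s r Q (U, V)).2 = pvSpec s r Q.length U V := by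
        apply ih
        · exact (List.pairwise_cons.mp hpw).2
        · exact fun c hc => hQ c (List.mem_cons.mpr (Or.inr hc))
        · intro i' j' hi' hj' hni' hfree'
          by_cases hin' : ((pvCodeN s r i' j' : Nat) : Int) ∈ ((pvCodeN s r i j : Nat) : Int) :: Q
          · rcases List.mem_cons.mp hin' with he | hq
            · have heq : (i', j') = ((i, j) : Nat × Nat) :=
                pv_code_inj hi' hj' hi hj (by exact_mod_cast he)
              cases heq
              exact hfree hfree'
            · exact hni' hq
          · exact h3 i' j' hi' hj' hin' hfree'
      rw [List.length_cons]
      refine Eq.trans hscan ?_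
      by_cases hPL0 : pvPL s r U V = []
      · have hpick : pvPick s r U V = none := by unfold pvPick; rw [hPL0]
        rw [pv_spec_pick_none hpick, pv_spec_pick_none hpick]
      · -- the free codes are all in Q, so Q is long enough for the spec to be stable
        have hsub : ∀ x ∈ (pvPL s r U V).map (fun p => ((pvCodeN s r p.1 p.2 : Nat) : Int)), x ∈ Q := by
          intro x hx
          obtain ⟨p, hp, rfl⟩ := List.mem_map.mp hx
          have hpF := pv_mem_PL.mp hp
          have hpb1 : p.1 < s.length := (pv_mem_free.mp hpF.1).1
          have hpb2 : p.2 < r.length := (pv_mem_free.mp hpF.2).1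
          have hin : ((pvCodeN s r p.1 p.2 : Nat) : Int) ∈ ((pvCodeN s r i j : Nat) : Int) :: Q := by
            by_contra hni
            exact h3 _ _ hpb1 hpb2 hni ⟨hpF.1, hpF.2⟩
          rcases List.mem_cons.mp hin with he | hq
          · exfalso
            have : p = ((i, j) : Nat × Nat) := pv_code_inj hpb1 hpb2 hi hj (by exact_mod_cast he)
            cases this
            exact hfree ⟨hpF.1, hpF.2⟩
          · exact hq
        have hlen : (pvPL s r U V).length ≤ Q.length := by
          have := (List.subperm_of_subset (pv_PL_codes_nodup s r U V) hsub).length_le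
          simpa using this
        have hJne : pvFree r.length V ≠ [] := by
          intro h
          exact hPL0 ((pv_PL_nil_iff s r U V).mpr (Or.inr h))
        have hJ1 : 1 ≤ (pvFree r.length V).length := by
          cases hJfl : pvFree r.length V with
          | nil => exact absurd hJfl hJne
          | cons a l => simp
        have hbound : (pvFree s.length U).length ≤ Q.length := by
          have := pv_PL_len s r U V
          nlinarith [hlen, hJ1]
        exact pv_spec_stable s r Q.length (Q.length + 1) U V hbound (by omega)

theorem pv_filter_map {α β : Type} (p : β → Bool) (f : α → β) (l : List α) :
    (l.map f).filter p = (l.filter (fun x => p (f x))).map f := by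
  induction l with
  | nil => rfl
  | cons a t ih =>
    simp only [List.map_cons, List.filter_cons]
    cases h : p (f a) <;> simp [h, ih]

theorem pv_enumerate_expand (xs : List Int) :
    PySem.List.enumerate xs
      = (List.range xs.length).map (fun (i : Nat) => ((i : Int), xs.getD i 0)) := by
  rw [PySem.List.enumerate_eq_map_pyRange xs 0]
  have hlen : PySem.List.len xs = (xs.length : Int) := rfl
  rw [hlen, PySem.List.pyRange_zero_natCast, List.map_map]
  apply List.map_congr_left
  intro i _
  simp [PySem.List.pyGetD_natCast]

theorem pv_leftover (r : List Int) (W : PySem.Set Int) :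
    ((PySem.List.enumerate r).filter (fun q => !(PySem.Set.contains W q.1))).map (fun q => q.2)
      = pvRestrict r W := by
  rw [pv_enumerate_expand, pv_filter_map, List.map_map]
  rfl

theorem pv_code_cast (s r : List Int) (i j : Nat) :
    |s.getD i 0 - r.getD j 0| * ((s.length : Int) * (r.length : Int))
        + ((i : Int) * (r.length : Int) + (j : Int))
      = ((pvCodeN s r i j : Nat) : Int) := by
  rw [pv_abs_cast]
  unfold pvCodeN pvD
  push_cast
  ring

theorem pv_codes_expand (s r : List Int) :
    pvCodes s r = (List.range s.length).flatMap
      (fun i => (List.range r.length).map (fun j => ((pvCodeN s r i j : Nat) : Int))) := by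
  unfold pvCodes pvPL
  rw [pv_free_nil, pv_free_nil, List.map_flatMap]
  simp only [List.map_map]
  rfl

theorem pv_B_main (s r : List Int) (h0 : ¬ s.length = r.length) (h1 : ¬ s.length > r.length)
    (h2 : ¬ s.length = 0) :
    get_mismatch_line_alt s r = ([], pvRestrict r (pvSpec s r (s.length * r.length) [] [])) := by
  have hm : 0 < r.length := by omega
  have hcodes : (PySem.List.enumerate s).foldl (fun acc p =>
      (PySem.List.enumerate r).foldl (fun acc2 q =>
        acc2 ++ [|p.2 - q.2| * ((s.length : Int) * (r.length : Int))
          + (p.1 * (r.length : Int) + q.1)]) acc) ([] : List Int)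
      = pvCodes s r := by
    rw [pv_foldl_nest (PySem.List.enumerate s) (PySem.List.enumerate r)
      (fun acc2 p q => acc2 ++ [|p.2 - q.2| * ((s.length : Int) * (r.length : Int))
        + (p.1 * (r.length : Int) + q.1)]) ([] : List Int)]
    rw [PySem.List.foldl_append_singleton_eq_map
      (fun pq : (Int × Int) × (Int × Int) => |pq.1.2 - pq.2.2| * ((s.length : Int) * (r.length : Int))
        + (pq.1.1 * (r.length : Int) + pq.2.1))]
    rw [List.nil_append, pv_enumerate_expand s, pv_enumerate_expand r,
      List.flatMap_map, List.map_flatMap, pv_codes_expand]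
    have hfun : ∀ i : Nat,
        (((List.range r.length).map (fun (j : Nat) => ((j : Int), r.getD j 0))).map
            (fun b => (((i : Int), s.getD i 0), b))).map
          (fun pq : (Int × Int) × (Int × Int) =>
            |pq.1.2 - pq.2.2| * ((s.length : Int) * (r.length : Int))
              + (pq.1.1 * (r.length : Int) + pq.2.1))
        = (List.range r.length).map (fun j => ((pvCodeN s r i j : Nat) : Int)) := by
      intro i
      rw [List.map_map, List.map_map]
      apply List.map_congr_left
      intro j _
      exact pv_code_cast s r i j
    exact List.flatMap_congr (fun i _ => hfun i)
  have hQperm := PySem.List.sorted_perm (pvCodes s r) (fun x => x) false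
  have hQnd : (PySem.List.sorted (pvCodes s r) (fun x => x) false).Nodup :=
    hQperm.nodup_iff.mpr (pv_codes_nodup s r)
  have hQle := PySem.List.sorted_pairwise (pvCodes s r) (fun x => x)
  have hQlt : (PySem.List.sorted (pvCodes s r) (fun x => x) false).Pairwise (· < ·) :=
    (hQle.and hQnd).imp (fun {a b} h => lt_of_le_of_ne h.1 h.2)
  have hscan := pv_scan_eq s r hm (PySem.List.sorted (pvCodes s r) (fun x => x) false) [] []
    hQlt
    (fun c hc => hQperm.mem_iff.mp hc)
    (fun i j hi hj hni _ => absurd (hQperm.mem_iff.mpr (pv_mem_codes s r hi hj)) hni)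
  have hlen : (PySem.List.sorted (pvCodes s r) (fun x => x) false).length
      = s.length * r.length := by
    rw [PySem.List.length_sorted, pv_codes_len]
  unfold get_mismatch_line_alt
  dsimp only
  rw [if_neg h0, if_neg h1, if_neg h2, hcodes, pv_leftover]
  refine congrArg (fun w => (([] : List Int), pvRestrict r w)) ?_
  exact (show (pvScan s r (PySem.List.sorted (pvCodes s r) (fun x => x) false) ([], [])).2
      = _ from hscan).trans (by rw [hlen])


-- ===== VERDICT (by name: the statement is the Claim_ definition above) =====
theorem get_mismatch_line_spec : Claim_equal_get_mismatch_line := by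
  unfold Claim_equal_get_mismatch_line Spec_get_mismatch_line
  intro s r _ hpre
  by_cases h0 : s.length = r.length
  · rw [get_mismatch_line, if_pos h0]
    unfold get_mismatch_line_alt
    dsimp only
    rw [if_pos h0]
  · by_cases h1 : s.length > r.length
    · rw [get_mismatch_line, if_neg h0, if_pos h1]
      unfold get_mismatch_line_alt
      dsimp only
      rw [if_neg h0, if_pos h1]
    · by_cases h2 : s.length = 0
      · rw [get_mismatch_line, if_neg h0, if_neg h1, if_neg (show ¬ s.length ≠ 0 by omega)]
        unfold get_mismatch_line_alt
        dsimp only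
        rw [if_neg h0, if_neg h1, if_pos h2]
      · have hOK : pvOK s r s.length [] [] = true := by
          rcases hpre with h | h
          · exact absurd h (by omega)
          · exact h
        have hA : get_mismatch_line s r = ([], pvRestrict r (pvSpec s r s.length [] [])) := by
          have hmain := pv_A_main s r s.length [] []
            (by rw [pv_restrict_nil]) (by rw [pv_restrict_nil]; omega) hOK
          rwa [pv_restrict_nil, pv_restrict_nil] at hmain
        have hB := pv_B_main s r h0 h1 h2
        rw [hA, hB]
        rw [pv_spec_stable s r s.length (s.length * r.length) [] []
          (by rw [pv_free_nil]; simp) (Nat.le_mul_of_pos_right _ (by omega))]
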